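-- pv_equiv track=rewrite | github.com/Steflavoie65/Lychrel_196_Formula | scripts/hensel_lift_certify.py | F_vector
-- ===== SOURCE A (Python) =====
-- def F_vector(rep, c):
--     # returns vector length m of palindromicity equations evaluated at integer carries c
--     s = str(rep)
--     d = len(s)
--     a = list(map(int, s[::-1]))
--     b = [0]*d
--     for i in range(d):
--         c_prev = c[i-1] if i-1 >=0 else 0
--         s_i = a[i] + a[d-1-i] + c_prev
--         bi = s_i - 10*c[i]
--         b[i] = bi
--     # build m constraints: for i in 0..m-1, we want b[i] - b[d-1-i] == 0 (if no overflow)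
--     m = d//2
--     vec = [0]*m
--     for i in range(m):
--         vec[i] = b[i] - b[d-1-i]
--     return vec
-- ===== SOURCE B (Python) =====
-- def F_vector(rep, c):
--     # Digit terms a[i]+a[d-1-i] cancel in b[i]-b[d-1-i], so only carries matter.
--     d = len(str(rep))
--     m = d // 2
--     return [(c[i-1] if i >= 1 else 0) - 10*c[i] - c[d-2-i] + 10*c[d-1-i]
--             for i in range(m)]
-- ===== Notes on version B (the rewrite author's own statement) =====
-- stated objective: simpler
-- what changed: B replaces A's two array-building passes (digit array a and sum array b) by a single closed-form comprehension over the carries: in b[i]-b[d-1-i] the digit terms a[i]+a[d-1-i] cancel, so only rep's digit count is used.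
import Mathlib
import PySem

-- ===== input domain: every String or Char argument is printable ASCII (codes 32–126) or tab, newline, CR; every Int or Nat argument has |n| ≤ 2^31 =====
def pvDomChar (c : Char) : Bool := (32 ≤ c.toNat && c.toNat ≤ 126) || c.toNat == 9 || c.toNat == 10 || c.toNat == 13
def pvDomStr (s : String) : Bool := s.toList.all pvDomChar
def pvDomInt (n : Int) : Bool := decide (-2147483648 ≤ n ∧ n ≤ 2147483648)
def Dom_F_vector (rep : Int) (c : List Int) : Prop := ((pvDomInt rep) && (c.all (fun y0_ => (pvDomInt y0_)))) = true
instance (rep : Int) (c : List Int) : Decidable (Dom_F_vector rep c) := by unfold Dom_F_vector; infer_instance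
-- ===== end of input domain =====

-- B drops A's digit array a and sum array b: the digit terms cancel in b[i]-b[d-1-i],
-- so B emits each constraint directly from the carries in one comprehension (objective: simpler).

-- ===== PORT A =====
def F_vector (rep : Int) (c : List Int) : List Int :=
  let s := PySem.Int.toStr rep
  let d : Int := (s.toList.length : Int)
  -- int(ch) per reversed char: exact for digit chars; rep < 0 ('-' → ValueError) is excluded by Pre_
  let a : List Int := s.toList.reverse.map (fun ch => (PySem.Int.ofChars? [ch]).getD 0)
  let b0 : List Int := PySem.List.pyRepeat [0] d
  let b := (PySem.List.pyRange 0 d 1).foldl (fun b i =>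
    let c_prev := if 0 ≤ i - 1 then PySem.List.pyGetD c (i - 1) 0 else 0
    let s_i := PySem.List.pyGetD a i 0 + PySem.List.pyGetD a (d - 1 - i) 0 + c_prev
    let bi := s_i - 10 * PySem.List.pyGetD c i 0
    PySem.List.pySetD b i bi) b0
  let m := PySem.Int.floordiv d 2
  let vec0 : List Int := PySem.List.pyRepeat [0] m
  (PySem.List.pyRange 0 m 1).foldl (fun vec i =>
    PySem.List.pySetD vec i
      (PySem.List.pyGetD b i 0 - PySem.List.pyGetD b (d - 1 - i) 0)) vec0

-- ===== PORT B =====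
def F_vector_alt (rep : Int) (c : List Int) : List Int :=
  let d : Int := ((PySem.Int.toStr rep).toList.length : Int)
  let m := PySem.Int.floordiv d 2
  (PySem.List.pyRange 0 m 1).map (fun i =>
    (if 1 ≤ i then PySem.List.pyGetD c (i - 1) 0 else 0)
    - 10 * PySem.List.pyGetD c i 0
    - PySem.List.pyGetD c (d - 2 - i) 0
    + 10 * PySem.List.pyGetD c (d - 1 - i) 0)

-- ===== PRECONDITION & SPEC =====
-- Pre_ excludes rep < 0 (int('-') raises ValueError in A) and carry lists shorter than
-- rep's digit count (A's c[i] raises IndexError): exactly the inputs where A raises.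
def Pre_F_vector (rep : Int) (c : List Int) : Prop :=
  0 ≤ rep ∧ (PySem.Int.toStr rep).toList.length ≤ c.length
instance (rep : Int) (c : List Int) : Decidable (Pre_F_vector rep c) := by
  unfold Pre_F_vector; infer_instance
def pvWitness_F_vector : Int × List Int := (1234, [1, 0, 1, 0])

def Spec_F_vector (rep : Int) (c : List Int) (out : List Int) : Prop := out = F_vector_alt rep c
instance (rep : Int) (c : List Int) (out : List Int) : Decidable (Spec_F_vector rep c out) := by unfold Spec_F_vector; infer_instance

-- ===== CLAIM (what is proved, stated in full; the proofs are below) =====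
def Claim_equal_F_vector : Prop := ∀ (rep : Int) (c : List Int), Dom_F_vector rep c → Pre_F_vector rep c → Spec_F_vector rep c (F_vector rep c)

-- ===== LEMMAS AND PROOFS =====

-- A "[0]*n then v[i] = f i for i in range(n')" loop is the map of f over the range (n' ≤ n).
theorem foldl_pySetD_pyRange (f : Int → Int) (n : Nat) :
    ∀ (j : Nat), j ≤ n →
      (PySem.List.pyRange 0 (j : Int) 1).foldl
          (fun v i => PySem.List.pySetD v i (f i)) (List.replicate n 0)
        = (PySem.List.pyRange 0 (j : Int) 1).map f ++ List.replicate (n - j) 0 := by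
  intro j
  induction j with
  | zero => intro _; simp [PySem.List.pyRange_one_eq_nil]
  | succ j ih =>
    intro hj
    have hsplit : PySem.List.pyRange 0 ((j + 1 : Nat) : Int) 1
        = PySem.List.pyRange 0 (j : Int) 1 ++ [(j : Int)] := by
      push_cast
      exact PySem.List.pyRange_one_succ_right (by positivity)
    rw [hsplit, List.foldl_append, List.map_append, ih (by omega)]
    have hlen : ((PySem.List.pyRange 0 (j : Int) 1).map f).length = j := by
      simp [PySem.List.length_pyRange_one]
    have hrep : List.replicate (n - j) (0 : Int)
        = 0 :: List.replicate (n - (j + 1)) 0 := by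
      have : n - j = (n - (j + 1)) + 1 := by omega
      rw [this, List.replicate_succ]
    simp only [List.foldl_cons, List.foldl_nil, PySem.List.pySetD_natCast]
    rw [hrep, List.set_append_right _ _ (le_of_eq hlen), hlen, Nat.sub_self]
    simp

theorem F_vector_spec_aux (rep : Int) (c : List Int)
    (_hrep : 0 ≤ rep) (_hlen : (PySem.Int.toStr rep).toList.length ≤ c.length) :
    F_vector rep c = F_vector_alt rep c := by
  unfold F_vector F_vector_alt
  simp only []
  set s := PySem.Int.toStr rep with hs
  set nd : Nat := s.toList.length with hnd
  set a : List Int := s.toList.reverse.map (fun ch => (PySem.Int.ofChars? [ch]).getD 0) with ha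
  set g : Int → Int := fun i =>
    PySem.List.pyGetD a i 0 + PySem.List.pyGetD a ((nd : Int) - 1 - i) 0
      + (if 0 ≤ i - 1 then PySem.List.pyGetD c (i - 1) 0 else 0)
      - 10 * PySem.List.pyGetD c i 0 with hg
  set mn : Nat := nd / 2 with hmn
  have hm : PySem.Int.floordiv (nd : Int) 2 = (mn : Int) := by
    rw [PySem.Int.floordiv_eq_ediv_of_pos (by omega)]
    omega
  have hb : (PySem.List.pyRange 0 (nd : Int) 1).foldl (fun b i =>
        PySem.List.pySetD b i (g i)) (PySem.List.pyRepeat [0] (nd : Int))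
      = (PySem.List.pyRange 0 (nd : Int) 1).map g := by
    rw [show PySem.List.pyRepeat [0] ((nd : Int)) = List.replicate nd (0 : Int) by
      simp [PySem.List.pyRepeat_singleton]]
    simpa using foldl_pySetD_pyRange g nd nd le_rfl
  set b : List Int := (PySem.List.pyRange 0 (nd : Int) 1).map g with hbdef
  rw [hb, hm]
  set f : Int → Int := fun i =>
    PySem.List.pyGetD b i 0 - PySem.List.pyGetD b ((nd : Int) - 1 - i) 0 with hf
  have hv : (PySem.List.pyRange 0 (mn : Int) 1).foldl (fun v i =>
        PySem.List.pySetD v i (f i)) (PySem.List.pyRepeat [0] (mn : Int))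
      = (PySem.List.pyRange 0 (mn : Int) 1).map f := by
    rw [show PySem.List.pyRepeat [0] ((mn : Int)) = List.replicate mn (0 : Int) by
      simp [PySem.List.pyRepeat_singleton]]
    simpa using foldl_pySetD_pyRange f mn mn le_rfl
  rw [hv]
  apply List.map_congr_left
  intro i hi
  rw [PySem.List.mem_pyRange_one] at hi
  have h2m : 2 * mn ≤ nd := by omega
  have hi1 : 0 ≤ i := hi.1
  have hi2 : i < (mn : Int) := hi.2
  have hilt : i < (nd : Int) := by omega
  have hrlt : (0:Int) ≤ (nd : Int) - 1 - i ∧ (nd : Int) - 1 - i < (nd : Int) := by omega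
  have e1 : PySem.List.pyGetD b i 0 = g i := by
    rw [hbdef]
    exact PySem.List.pyGetD_map_pyRange_of_nonneg g (nd : Int) i 0 hi1 hilt
  have e2 : PySem.List.pyGetD b ((nd : Int) - 1 - i) 0 = g ((nd : Int) - 1 - i) := by
    rw [hbdef]
    exact PySem.List.pyGetD_map_pyRange_of_nonneg g (nd : Int) _ 0 hrlt.1 hrlt.2
  simp only [hf, e1, e2, hg]
  have eidx : (nd : Int) - 1 - ((nd : Int) - 1 - i) = i := by ring
  rw [eidx]
  have hcond : (0 : Int) ≤ ((nd : Int) - 1 - i) - 1 := by omega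
  rw [if_pos hcond]
  have hidx2 : (nd : Int) - 1 - i - 1 = (nd : Int) - 2 - i := by ring
  rw [hidx2]
  by_cases h1 : (1:Int) ≤ i
  · rw [if_pos (show (0:Int) ≤ i - 1 by omega), if_pos h1]; ring
  · rw [if_neg (show ¬ (0:Int) ≤ i - 1 by omega), if_neg h1]; ring

-- ===== VERDICT (by name: the statement is the Claim_ definition above) =====
theorem F_vector_spec : Claim_equal_F_vector := by
  intro rep c _ hpre
  exact F_vector_spec_aux rep c hpre.1 hpre.2
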